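-- pv_equiv track=rewrite | github.com/webwanderer2024/wondrous_net | Tracks.py | extract_message
-- ===== SOURCE A (Python) =====
-- def extract_message(grid, path):
--     """Function that extract message from the given grid according to the given path.
--        Input:
--            grid - tuple of tuples of the same size, that consist of integers and None-values: representation of the given grid;
--            path - tuple of tuples of two integers: path from the corresponding grid of the puzzle.
--        Output:
--            string - exctracted message: if path moved through a cell of the grid and that cell is not empty,
--            than the message will have a number from that cell in the corresponding place,
--            otherwise there will be '-' character on that place."""
--     num_rows = len(grid)
--     num_cols = len(grid[0])
--     message = ''
--     # decremental loop for the number of rows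
--     for row in range(num_rows-1,-1,-1):
--         for col in range(num_cols):
--             cell_value = grid[row][col]
--             if (col,row) in path and isinstance(cell_value, int):
--                 message += str(cell_value)
--             else:
--                 message += '-'
--         # add newline character after each row
--         message += '\n'
--     return message
-- ===== SOURCE B (Python) =====
-- def extract_message(grid, path):
--     num_rows = len(grid)
--     num_cols = len(grid[0])
--     buf = [['-'] * num_cols for _ in range(num_rows)]
--     for col, row in path:
--         if 0 <= row < num_rows and 0 <= col < num_cols:
--             v = grid[row][col]
--             if isinstance(v, int):
--                 buf[row][col] = str(v)
--     return ''.join(''.join(r) + '\n' for r in reversed(buf))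
-- ===== Notes on version B (the rewrite author's own statement) =====
-- stated objective: faster
-- what changed: Instead of scanning every grid cell and testing '(col,row) in path' per cell, B allocates a '-' buffer, makes one pass over path writing bounded in-range digits into it, then joins the rows bottom-up.
import Mathlib
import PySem

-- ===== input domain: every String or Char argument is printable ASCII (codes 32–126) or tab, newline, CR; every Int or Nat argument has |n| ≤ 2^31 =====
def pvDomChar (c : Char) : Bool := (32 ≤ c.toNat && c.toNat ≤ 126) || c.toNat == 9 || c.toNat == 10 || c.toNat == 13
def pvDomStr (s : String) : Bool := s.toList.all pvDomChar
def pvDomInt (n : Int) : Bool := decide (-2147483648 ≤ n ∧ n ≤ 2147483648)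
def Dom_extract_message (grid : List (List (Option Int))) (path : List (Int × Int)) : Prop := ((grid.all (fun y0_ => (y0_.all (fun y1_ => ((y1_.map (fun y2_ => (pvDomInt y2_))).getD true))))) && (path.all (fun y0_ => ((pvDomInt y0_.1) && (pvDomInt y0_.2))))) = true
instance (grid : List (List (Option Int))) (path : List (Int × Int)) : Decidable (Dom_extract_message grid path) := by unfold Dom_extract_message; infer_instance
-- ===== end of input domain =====

-- B replaces A's per-cell '(col,row) in path' scan by a single pass over path that writes into a '-' buffer, then joins the rows bottom-up (same return value).

-- ===== PORT A =====
-- literal port of A; the growing message string is carried as a List Char (String.ofList at the end), per PySem convention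
def extract_message (grid : List (List (Option Int))) (path : List (Int × Int)) : String :=
  let num_rows : Int := grid.length
  let num_cols : Int := (PySem.List.pyGetD grid 0 []).length
  let message : List Char :=
    (PySem.List.pyRange (num_rows - 1) (-1) (-1)).foldl (fun msg row =>
      ((PySem.List.pyRange 0 num_cols 1).foldl (fun m col =>
        let cell_value := PySem.List.pyGetD (PySem.List.pyGetD grid row []) col none
        if (col, row) ∈ path then
          match cell_value with
          | some v => m ++ PySem.Int.toChars v
          | none => m ++ ['-']
        else m ++ ['-']) msg) ++ ['\n']) []
  String.ofList message

-- ===== PORT B =====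
def extract_message_alt (grid : List (List (Option Int))) (path : List (Int × Int)) : String :=
  let num_rows := grid.length
  let num_cols := (grid.headD []).length
  let buf0 : List (List (List Char)) := List.replicate num_rows (List.replicate num_cols ['-'])
  let buf :=
    path.foldl (fun buf cr =>
      if 0 ≤ cr.2 ∧ cr.2 < (num_rows : Int) ∧ 0 ≤ cr.1 ∧ cr.1 < (num_cols : Int) then
        match PySem.List.pyGetD (PySem.List.pyGetD grid cr.2 []) cr.1 none with
        | some v =>
            PySem.List.pySetD buf cr.2
              (PySem.List.pySetD (PySem.List.pyGetD buf cr.2 []) cr.1 (PySem.Int.toChars v))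
        | none => buf
      else buf) buf0
  String.ofList ((buf.reverse.map (fun r => r.flatten ++ ['\n'])).flatten)

-- the loop body of B, named for the proofs

-- ===== PRECONDITION & SPEC =====
-- Pre_ excludes exactly the inputs on which A raises IndexError: the empty grid (grid[0]) and
-- ragged grids in which some row is shorter than the first row (grid[row][col], col < len(grid[0])).
def Pre_extract_message (grid : List (List (Option Int))) (path : List (Int × Int)) : Prop :=
  grid ≠ [] ∧ ∀ r ∈ grid, (grid.headD []).length ≤ r.length
instance (grid : List (List (Option Int))) (path : List (Int × Int)) : Decidable (Pre_extract_message grid path) := by unfold Pre_extract_message; infer_instance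

def pvWitness_extract_message : List (List (Option Int)) × (List (Int × Int)) :=
  ([[some 1, none], [some 23, some (-4)]], [(0, 0), (1, 1), (5, -1)])

def Spec_extract_message (grid : List (List (Option Int))) (path : List (Int × Int)) (out : String) : Prop := out = extract_message_alt grid path
instance (grid : List (List (Option Int))) (path : List (Int × Int)) (out : String) : Decidable (Spec_extract_message grid path out) := by unfold Spec_extract_message; infer_instance

-- ===== CLAIM (what is proved, stated in full; the proofs are below) =====
def Claim_equal_extract_message : Prop := ∀ (grid : List (List (Option Int))) (path : List (Int × Int)), Dom_extract_message grid path → Pre_extract_message grid path → Spec_extract_message grid path (extract_message grid path)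

-- ===== LEMMAS AND PROOFS =====
def pvEntry (grid : List (List (Option Int))) (path : List (Int × Int)) (r c : Nat) : List Char :=
  if ((c : Int), (r : Int)) ∈ path then
    match (grid.getD r []).getD c none with
    | some v => PySem.Int.toChars v
    | none => ['-']
  else ['-']

def pvRowBlock (grid : List (List (Option Int))) (path : List (Int × Int)) (nC r : Nat) : List Char :=
  ((List.range nC).map (pvEntry grid path r)).flatten ++ ['\n']

theorem pvGetD_zero_headD (grid : List (List (Option Int))) :
    PySem.List.pyGetD grid 0 [] = grid.headD [] := by
  cases grid <;> simp [PySem.List.pyGetD_zero]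

theorem pvA_eq (grid : List (List (Option Int))) (path : List (Int × Int)) :
    extract_message grid path =
      String.ofList (((List.range grid.length).reverse.map
        (pvRowBlock grid path ((grid.headD []).length))).flatten) := by
  unfold extract_message
  simp only [pvGetD_zero_headD]
  congr 1
  rw [PySem.List.pyRange_neg_one_eq_reverse]
  rw [show ((-1 : Int) + 1) = 0 from by ring,
      show ((grid.length : Int) - 1 + 1) = (grid.length : Int) from by ring]
  rw [PySem.List.pyRange_zero_nat, PySem.List.pyRange_zero_nat]
  rw [← List.map_reverse, List.foldl_map]
  rw [PySem.List.foldl_congr_mem _ _ (fun acc r => acc ++ pvRowBlock grid path ((grid.headD []).length) r) _ ?_]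
  · rw [PySem.List.foldl_append_eq_flatMap]
    simp [List.flatMap_def]
  · intro acc r _
    dsimp only
    rw [List.foldl_map]
    rw [PySem.List.foldl_congr_mem _ _ (fun m c => m ++ pvEntry grid path r c) _ ?_]
    · rw [PySem.List.foldl_append_eq_flatMap, pvRowBlock]
      simp [List.flatMap_def, List.append_assoc]
    · intro m c _
      dsimp only [pvEntry]
      simp only [PySem.List.pyGetD_natCast]
      split
      · split <;> rfl
      · rfl

def pvStep (grid : List (List (Option Int))) (nR nC : Nat)
    (buf : List (List (List Char))) (cr : Int × Int) : List (List (List Char)) :=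
  if 0 ≤ cr.2 ∧ cr.2 < (nR : Int) ∧ 0 ≤ cr.1 ∧ cr.1 < (nC : Int) then
    match PySem.List.pyGetD (PySem.List.pyGetD grid cr.2 []) cr.1 none with
    | some v =>
        PySem.List.pySetD buf cr.2
          (PySem.List.pySetD (PySem.List.pyGetD buf cr.2 []) cr.1 (PySem.Int.toChars v))
    | none => buf
  else buf

theorem pvStep_length (grid : List (List (Option Int))) (nR nC : Nat)
    (buf : List (List (List Char))) (cr : Int × Int) :
    (pvStep grid nR nC buf cr).length = buf.length := by
  unfold pvStep
  split
  · split <;> simp [PySem.List.length_pySetD]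
  · rfl

theorem pvFoldl_length (grid : List (List (Option Int))) (nR nC : Nat)
    (path : List (Int × Int)) (buf : List (List (List Char))) :
    (path.foldl (pvStep grid nR nC) buf).length = buf.length := by
  induction path generalizing buf with
  | nil => rfl
  | cons p ps ih => simp [List.foldl_cons, ih, pvStep_length]

theorem pvStep_rows (grid : List (List (Option Int))) (nR nC : Nat)
    (buf : List (List (List Char))) (cr : Int × Int)
    (hlen : buf.length = nR) (hrow : ∀ b ∈ buf, b.length = nC) :
    ∀ b ∈ pvStep grid nR nC buf cr, b.length = nC := by
  intro b hb
  unfold pvStep at hb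
  split at hb
  · rename_i hbd
    split at hb
    · rename_i v hv
      rw [PySem.List.pySetD_of_nonneg _ _ hbd.1] at hb
      rcases List.mem_or_eq_of_mem_set hb with h | h
      · exact hrow b h
      · subst h
        rw [PySem.List.pySetD_of_nonneg _ _ hbd.2.2.1, List.length_set]
        refine hrow _ (PySem.List.pyGetD_mem _ _ ?_)
        unfold PySem.Raise.InRange
        omega
    · exact hrow b hb
  · exact hrow b hb

theorem pvFoldl_rows (grid : List (List (Option Int))) (nR nC : Nat)
    (path : List (Int × Int)) (buf : List (List (List Char)))
    (hlen : buf.length = nR) (hrow : ∀ b ∈ buf, b.length = nC) :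
    ∀ b ∈ path.foldl (pvStep grid nR nC) buf, b.length = nC := by
  induction path generalizing buf with
  | nil => exact hrow
  | cons p ps ih =>
    exact ih _ (by rw [pvStep_length, hlen]) (pvStep_rows grid nR nC buf p hlen hrow)

theorem pv_getD_set (l : List (List Char)) (i : Nat) (x : List Char) (r : Nat)
    (d : List Char) (hr : r < l.length) :
    (l.set i x).getD r d = if i = r then x else l.getD r d := by
  rw [List.getD_eq_getElem _ _ (by rw [List.length_set]; omega), List.getElem_set]
  split
  · rfl
  · rw [List.getD_eq_getElem _ _ hr]

theorem pv_getD_set' (l : List (List (List Char))) (i : Nat) (x : List (List Char)) (r : Nat)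
    (hr : r < l.length) :
    (l.set i x).getD r [] = if i = r then x else l.getD r [] := by
  rw [List.getD_eq_getElem _ _ (by rw [List.length_set]; omega), List.getElem_set]
  split
  · rfl
  · rw [List.getD_eq_getElem _ _ hr]

theorem pvStep_getD (grid : List (List (Option Int))) (nR nC : Nat)
    (buf : List (List (List Char))) (cr : Int × Int)
    (hlen : buf.length = nR) (hrow : ∀ b ∈ buf, b.length = nC)
    (r c : Nat) (hr : r < nR) (hc : c < nC) :
    ((pvStep grid nR nC buf cr).getD r []).getD c ['-'] =
    if cr = ((c : Int), (r : Int)) then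
      (match (grid.getD r []).getD c none with
       | some v => PySem.Int.toChars v
       | none => (buf.getD r []).getD c ['-'])
    else (buf.getD r []).getD c ['-'] := by
  have hrlen : (buf.getD r []).length = nC := by
    rw [List.getD_eq_getElem _ _ (by omega)]
    exact hrow _ (List.getElem_mem _)
  unfold pvStep
  by_cases hcr : cr = ((c : Int), (r : Int))
  · subst hcr
    rw [if_pos (by refine ⟨by omega, by simp; omega, by omega, by simp; omega⟩),
        if_pos rfl]
    simp only [PySem.List.pyGetD_natCast]
    cases hcell : (grid.getD r []).getD c none with
    | some v =>
      dsimp only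
      rw [PySem.List.pySetD_of_nonneg _ _ (by omega),
          PySem.List.pySetD_of_nonneg _ _ (by omega)]
      simp only [Int.toNat_natCast]
      rw [pv_getD_set' _ _ _ _ (by omega), if_pos rfl]
      rw [pv_getD_set _ _ _ _ _ (by omega), if_pos rfl]
    | none => rfl
  · rw [if_neg hcr]
    split
    · rename_i hbd
      split
      · rename_i v hv
        rw [PySem.List.pySetD_of_nonneg _ _ hbd.1]
        rw [pv_getD_set' _ _ _ _ (by omega)]
        by_cases h2 : cr.2.toNat = r
        · rw [if_pos h2]
          have hc1 : cr.1.toNat ≠ c := by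
            intro h1
            apply hcr
            obtain ⟨a, b⟩ := cr
            simp only [Prod.mk.injEq]
            simp only at h1 h2
            obtain ⟨hb1, hb2, hb3, hb4⟩ := hbd
            simp only at hb1 hb3
            constructor <;> omega
          have hrowe : PySem.List.pyGetD buf cr.2 [] = buf.getD r [] := by
            rw [PySem.List.pyGetD_eq_getElem _ _ hbd.1 (by omega)]
            simp only [h2]
            rw [List.getD_eq_getElem _ _ (by omega)]
          rw [PySem.List.pySetD_of_nonneg _ _ hbd.2.2.1, hrowe]
          rw [pv_getD_set _ _ _ _ _ (by omega), if_neg hc1]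
        · rw [if_neg h2]
      · rfl
    · rfl

theorem pvFoldl_getD (grid : List (List (Option Int))) (nR nC : Nat)
    (path : List (Int × Int)) (buf : List (List (List Char)))
    (hlen : buf.length = nR) (hrow : ∀ b ∈ buf, b.length = nC)
    (r c : Nat) (hr : r < nR) (hc : c < nC) :
    ((path.foldl (pvStep grid nR nC) buf).getD r []).getD c ['-'] =
    match (grid.getD r []).getD c none with
    | some v =>
        if ((c : Int), (r : Int)) ∈ path then PySem.Int.toChars v
        else (buf.getD r []).getD c ['-']
    | none => (buf.getD r []).getD c ['-'] := by
  induction path generalizing buf with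
  | nil =>
    cases hcell : (grid.getD r []).getD c none with
    | some v => simp
    | none => rfl
  | cons p ps ih =>
    rw [List.foldl_cons,
        ih _ (by rw [pvStep_length, hlen]) (pvStep_rows grid nR nC buf p hlen hrow)]
    cases hcell : (grid.getD r []).getD c none with
    | some v =>
      dsimp only
      by_cases hmem : ((c : Int), (r : Int)) ∈ p :: ps
      · rw [if_pos hmem]
        by_cases hps : ((c : Int), (r : Int)) ∈ ps
        · rw [if_pos hps]
        · rw [if_neg hps]
          have hp : p = ((c : Int), (r : Int)) := by
            rcases List.mem_cons.mp hmem with h | h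
            · exact h.symm
            · exact absurd h hps
          rw [pvStep_getD grid nR nC buf p hlen hrow r c hr hc, if_pos hp, hcell]
      · have hp : ¬ p = ((c : Int), (r : Int)) ∧ ((c : Int), (r : Int)) ∉ ps := by
          rw [List.mem_cons] at hmem
          push Not at hmem
          exact ⟨fun h => hmem.1 h.symm, hmem.2⟩
        rw [if_neg hmem, if_neg hp.2,
            pvStep_getD grid nR nC buf p hlen hrow r c hr hc, if_neg hp.1]
    | none =>
      dsimp only
      rw [pvStep_getD grid nR nC buf p hlen hrow r c hr hc, hcell]
      split <;> rfl

theorem pvB_eq (grid : List (List (Option Int))) (path : List (Int × Int)) :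
    extract_message_alt grid path =
      String.ofList (((List.range grid.length).reverse.map
        (pvRowBlock grid path ((grid.headD []).length))).flatten) := by
  have hrfl : extract_message_alt grid path =
      String.ofList (((path.foldl (pvStep grid grid.length ((grid.headD []).length))
          (List.replicate grid.length (List.replicate ((grid.headD []).length) ['-']))).reverse.map
        (fun r => r.flatten ++ ['\n'])).flatten) := rfl
  rw [hrfl]
  have h0len : (List.replicate grid.length (List.replicate ((grid.headD []).length) ['-'])).length
      = grid.length := by simp
  have h0row : ∀ b ∈ List.replicate grid.length (List.replicate ((grid.headD []).length) ['-']),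
      b.length = ((grid.headD []).length) := by
    intro b hb
    rw [List.eq_of_mem_replicate hb]
    simp
  have hF : path.foldl (pvStep grid grid.length ((grid.headD []).length))
        (List.replicate grid.length (List.replicate ((grid.headD []).length) ['-']))
      = (List.range grid.length).map
          (fun r => (List.range ((grid.headD []).length)).map (pvEntry grid path r)) := by
    apply List.ext_getElem
    · rw [pvFoldl_length, h0len]
      simp
    · intro i h1 h2
      have hi : i < grid.length := by rw [pvFoldl_length, h0len] at h1; exact h1
      apply List.ext_getElem
      · have hmem := List.getElem_mem h1
        rw [pvFoldl_rows grid grid.length ((grid.headD []).length) path _ h0len h0row _ hmem]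
        simp
      · intro j hj1 hj2
        have hj : j < (grid.headD []).length := by
          have hmem := List.getElem_mem h1
          rw [pvFoldl_rows grid grid.length ((grid.headD []).length) path _ h0len h0row _ hmem] at hj1
          exact hj1
        have hkey := pvFoldl_getD grid grid.length ((grid.headD []).length) path _
          h0len h0row i j hi hj
        rw [List.getD_eq_getElem _ _ h1, List.getD_eq_getElem _ _ hj1] at hkey
        rw [hkey]
        simp only [List.getElem_map, List.getElem_range]
        have h0 : ((List.replicate grid.length
            (List.replicate ((grid.headD []).length) ['-'])).getD i []).getD j ['-'] = ['-'] := by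
          simp only [List.getD_eq_getElem?_getD, List.getElem?_replicate, hi, if_true]
          simp only [Option.getD_some, List.getElem?_replicate]
          split <;> rfl
        rw [h0]
        unfold pvEntry
        cases hcell : (grid.getD i []).getD j none with
        | some v => by_cases hmem : ((j : Int), (i : Int)) ∈ path <;> simp [hmem]
        | none => by_cases hmem : ((j : Int), (i : Int)) ∈ path <;> simp [hmem]
  rw [hF, ← List.map_reverse, List.map_map]
  rfl

-- ===== VERDICT (by name: the statement is the Claim_ definition above) =====
theorem extract_message_spec : Claim_equal_extract_message := by
  intro grid path _ _
  unfold Spec_extract_message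
  rw [pvA_eq, pvB_eq]
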